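-- pv_equiv track=rewrite | github.com/portal301/robot-vision-tutorial | test/convexhull3dpath.py | rearrange_nodes
-- ===== SOURCE A (Python) =====
-- def rearrange_nodes(nodes):
--     direction = 1 # 1 for right, -1 for left
--     for i in range(len(nodes)-1):
--         if nodes[i][1] == nodes[i+1][1]:
--             if direction == -1:
--                 temp = nodes[i]
--                 nodes[i] = nodes[i+1]
--                 nodes[i+1] = temp
--             direction *= -1
--     return nodes
-- ===== SOURCE B (Python) =====
-- def rearrange_nodes(nodes):
--     matches = [i for i in range(len(nodes) - 1) if nodes[i][1] == nodes[i + 1][1]]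
--     for j in matches[1::2]:
--         nodes[j], nodes[j + 1] = nodes[j + 1], nodes[j]
--     return nodes
-- ===== Notes on version B (the rewrite author's own statement) =====
-- stated objective: alternative
-- what changed: B collects all adjacent equal-y indices in one pass and then swaps only those at odd positions in that list, replacing A's running direction flag intertwined with in-place swaps.
import Mathlib
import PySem

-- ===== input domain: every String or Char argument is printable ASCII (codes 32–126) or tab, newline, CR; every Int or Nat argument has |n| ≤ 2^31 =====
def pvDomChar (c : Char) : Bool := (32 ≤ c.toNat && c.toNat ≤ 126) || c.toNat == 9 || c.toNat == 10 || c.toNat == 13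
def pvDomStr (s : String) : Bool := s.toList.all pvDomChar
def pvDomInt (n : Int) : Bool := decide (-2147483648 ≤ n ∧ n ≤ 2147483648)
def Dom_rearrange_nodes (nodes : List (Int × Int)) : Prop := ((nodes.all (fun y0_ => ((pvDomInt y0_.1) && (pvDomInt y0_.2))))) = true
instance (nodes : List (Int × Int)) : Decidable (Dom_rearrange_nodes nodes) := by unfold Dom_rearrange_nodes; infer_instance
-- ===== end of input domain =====

-- B replaces A's running direction flag by a collect-then-act two-pass (gather the adjacent
-- equal-y indices, then swap those at odd positions); equivalence is about the return value;
-- in Python both A and B mutate `nodes` in place and return the same object.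

-- ===== PORT A =====
-- Indices i and i+1 are always in range (i < len-1), so getD with a dummy default is exact.
def rearrange_nodes (nodes : List (Int × Int)) : List (Int × Int) :=
  ((List.range (nodes.length - 1)).foldl
    (fun (st : List (Int × Int) × Int) i =>
      let ns := st.1
      let dir := st.2
      if (ns.getD i (0, 0)).2 = (ns.getD (i + 1) (0, 0)).2 then
        let ns' :=
          if dir = -1 then
            let temp := ns.getD i (0, 0)
            (ns.set i (ns.getD (i + 1) (0, 0))).set (i + 1) temp
          else ns
        (ns', dir * -1)
      else (ns, dir))
    (nodes, 1)).1

-- ===== PORT B =====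
-- matches[1::2] : the elements at positions 1, 3, 5, … of the match list.
def pvEverySecond : List Nat → List Nat
  | [] => []
  | [_] => []
  | _ :: b :: t => b :: pvEverySecond t

def rearrange_nodes_alt (nodes : List (Int × Int)) : List (Int × Int) :=
  let ms := (List.range (nodes.length - 1)).filter
    (fun i => decide ((nodes.getD i (0, 0)).2 = (nodes.getD (i + 1) (0, 0)).2))
  (pvEverySecond ms).foldl
    (fun ns j => (ns.set j (ns.getD (j + 1) (0, 0))).set (j + 1) (ns.getD j (0, 0)))
    nodes

-- ===== PRECONDITION & SPEC =====
def Spec_rearrange_nodes (nodes : List (Int × Int)) (out : List (Int × Int)) : Prop := out = rearrange_nodes_alt nodes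
instance (nodes : List (Int × Int)) (out : List (Int × Int)) : Decidable (Spec_rearrange_nodes nodes out) := by unfold Spec_rearrange_nodes; infer_instance

-- ===== CLAIM (what is proved, stated in full; the proofs are below) =====
def Claim_equal_rearrange_nodes : Prop := ∀ (nodes : List (Int × Int)), Dom_rearrange_nodes nodes → Spec_rearrange_nodes nodes (rearrange_nodes nodes)

-- ===== LEMMAS AND PROOFS =====

-- the swap operation both ports perform
def pvSwap (ns : List (Int × Int)) (j : Nat) : List (Int × Int) :=
  (ns.set j (ns.getD (j + 1) (0, 0))).set (j + 1) (ns.getD j (0, 0))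

-- y-value read at index i, phrased through the snd-projection of the list
def pvSnd (ns : List (Int × Int)) (i : Nat) : Int := ((ns.map Prod.snd).getD i 0)

lemma pvSnd_getD (ns : List (Int × Int)) (i : Nat) :
    (ns.getD i (0, 0)).2 = pvSnd ns i := by
  unfold pvSnd
  cases h : ns[i]? with
  | none => simp [List.getD, h]
  | some v => simp [List.getD, h]

lemma set_getD_self (M : List Int) (i : Nat) : M.set i (M.getD i 0) = M := by
  apply List.ext_getElem?
  intro k
  by_cases hk : k = i
  · subst hk
    cases h : M[k]? with
    | none =>
      have hlen := List.getElem?_eq_none_iff.mp h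
      simp [List.getElem?_set, Nat.not_lt.mpr hlen]
    | some v =>
      have hlt : k < M.length := (List.getElem?_eq_some_iff.mp h).1
      have hv : M[k] = v := (List.getElem?_eq_some_iff.mp h).2
      simp [List.getElem?_set, hlt, List.getD, h, hv]
  · simp [List.getElem?_set, Ne.symm hk]

lemma getD_set_ne (M : List Int) (i j : Nat) (a : Int) (h : i ≠ j) :
    (M.set i a).getD j 0 = M.getD j 0 := by
  simp [List.getD, List.getElem?_set_ne h]

lemma pvSwap_map_snd (ns : List (Int × Int)) (j : Nat)
    (h : pvSnd ns j = pvSnd ns (j + 1)) :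
    (pvSwap ns j).map Prod.snd = ns.map Prod.snd := by
  unfold pvSwap
  rw [List.map_set, List.map_set, pvSnd_getD, pvSnd_getD, h]
  unfold pvSnd at h ⊢
  set M := ns.map Prod.snd with hM
  have h1 : ((M.set j (M.getD (j + 1) 0)).set (j + 1) (M.getD (j + 1) 0))
      = M.set j (M.getD (j + 1) 0) := by
    have := getD_set_ne M j (j + 1) (M.getD (j + 1) 0) (by omega)
    calc (M.set j (M.getD (j + 1) 0)).set (j + 1) (M.getD (j + 1) 0)
        = (M.set j (M.getD (j + 1) 0)).set (j + 1)
            ((M.set j (M.getD (j + 1) 0)).getD (j + 1) 0) := by rw [this]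
      _ = M.set j (M.getD (j + 1) 0) := set_getD_self _ _
  rw [h1, ← h, set_getD_self]

-- folding pvSwap over equal-y indices preserves the snd-projection
lemma foldl_swap_map_snd (js : List Nat) :
    ∀ ns : List (Int × Int), (∀ j ∈ js, pvSnd ns j = pvSnd ns (j + 1)) →
    (js.foldl pvSwap ns).map Prod.snd = ns.map Prod.snd := by
  induction js with
  | nil => intro ns _; rfl
  | cons j t ih =>
    intro ns h
    have hj := h j (List.mem_cons_self ..)
    have hs := pvSwap_map_snd ns j hj
    have ht : ∀ k ∈ t, pvSnd (pvSwap ns j) k = pvSnd (pvSwap ns j) (k + 1) := by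
      intro k hk
      unfold pvSnd
      rw [hs]
      exact h k (List.mem_cons_of_mem _ hk)
    simp only [List.foldl_cons]
    rw [ih (pvSwap ns j) ht, hs]

lemma pvEverySecond_append_single (l : List Nat) (x : Nat) :
    pvEverySecond (l ++ [x]) =
      if l.length % 2 = 1 then pvEverySecond l ++ [x] else pvEverySecond l := by
  induction l using pvEverySecond.induct with
  | case1 => simp [pvEverySecond]
  | case2 a => simp [pvEverySecond]
  | case3 a b t ih =>
    simp only [List.cons_append, pvEverySecond, List.length_cons, ih]
    have h2 : (t.length + 1 + 1) % 2 = t.length % 2 := by omega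
    rw [h2]
    split <;> simp

lemma pvEverySecond_subset (l : List Nat) : ∀ x ∈ pvEverySecond l, x ∈ l := by
  induction l using pvEverySecond.induct with
  | case1 => simp [pvEverySecond]
  | case2 a => simp [pvEverySecond]
  | case3 a b t ih =>
    intro x hx
    simp only [pvEverySecond, List.mem_cons] at hx ⊢
    rcases hx with rfl | hx
    · right; left; rfl
    · right; right; exact ih x hx

def pvCond (nodes : List (Int × Int)) (i : Nat) : Bool :=
  decide ((nodes.getD i (0, 0)).2 = (nodes.getD (i + 1) (0, 0)).2)

def pvStepA (st : List (Int × Int) × Int) (i : Nat) : List (Int × Int) × Int :=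
  if (st.1.getD i (0, 0)).2 = (st.1.getD (i + 1) (0, 0)).2 then
    (if st.2 = -1 then pvSwap st.1 i else st.1, st.2 * -1)
  else st

lemma cond_of_map_snd {ns nodes : List (Int × Int)} (h : ns.map Prod.snd = nodes.map Prod.snd)
    (i : Nat) : pvCond ns i = pvCond nodes i := by
  unfold pvCond
  rw [pvSnd_getD, pvSnd_getD, pvSnd_getD, pvSnd_getD]
  unfold pvSnd
  rw [h]

lemma filter_cond_mem {nodes : List (Int × Int)} {k : Nat} {j : Nat}
    (hj : j ∈ (List.range k).filter (pvCond nodes)) :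
    pvSnd nodes j = pvSnd nodes (j + 1) := by
  have h2 := (List.mem_filter.mp hj).2
  unfold pvCond at h2
  rw [pvSnd_getD, pvSnd_getD] at h2
  exact of_decide_eq_true h2

-- the main invariant: A's fold over range k equals B's swaps over the odd-position
-- matches below k, the direction tracking the parity of the match count
lemma main_inv (nodes : List (Int × Int)) (k : Nat) :
    (List.range k).foldl pvStepA (nodes, 1) =
      ((pvEverySecond ((List.range k).filter (pvCond nodes))).foldl pvSwap nodes,
       if ((List.range k).filter (pvCond nodes)).length % 2 = 0 then (1 : Int) else -1) := by
  induction k with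
  | zero => simp [pvEverySecond]
  | succ k ih =>
    have hsnd : ((pvEverySecond ((List.range k).filter (pvCond nodes))).foldl pvSwap nodes).map Prod.snd
        = nodes.map Prod.snd := by
      apply foldl_swap_map_snd
      intro j hj
      exact filter_cond_mem (pvEverySecond_subset _ j hj)
    have hL : (List.range (k + 1)).foldl pvStepA (nodes, 1)
        = pvStepA ((List.range k).foldl pvStepA (nodes, 1)) k := by
      rw [List.range_succ, List.foldl_append]; rfl
    set m := (List.range k).filter (pvCond nodes) with hm
    set Bk := (pvEverySecond m).foldl pvSwap nodes with hBk
    have hcond : pvCond Bk k = pvCond nodes k := cond_of_map_snd hsnd k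
    cases hc : pvCond nodes k with
    | false =>
      have hF : (List.range (k + 1)).filter (pvCond nodes) = m := by
        rw [List.range_succ, List.filter_append, hm]
        simp [List.filter_cons, hc]
      rw [hL, ih, hF]
      have hcb : ¬ ((Bk.getD k (0, 0)).2 = (Bk.getD (k + 1) (0, 0)).2) := by
        have h3 := hcond.trans hc
        unfold pvCond at h3
        exact of_decide_eq_false h3
      simp only [pvStepA]
      rw [if_neg hcb]
    | true =>
      have hF : (List.range (k + 1)).filter (pvCond nodes) = m ++ [k] := by
        rw [List.range_succ, List.filter_append, hm]
        simp [List.filter_cons, hc]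
      have hcb : (Bk.getD k (0, 0)).2 = (Bk.getD (k + 1) (0, 0)).2 := by
        have h3 := hcond.trans hc
        unfold pvCond at h3
        exact of_decide_eq_true h3
      rw [hL, ih, hF, pvEverySecond_append_single]
      simp only [pvStepA, List.length_append, List.length_cons, List.length_nil]
      rw [if_pos hcb]
      by_cases hp : m.length % 2 = 0
      · have hp1 : ¬ m.length % 2 = 1 := by omega
        have hp2 : ¬ (m.length + 0 + 1) % 2 = 0 := by omega
        rw [if_pos hp, if_neg hp1, if_neg hp2, if_neg (by norm_num : ¬ (1 : Int) = -1)]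
        norm_num
        exact hBk
      · have hp1 : m.length % 2 = 1 := by omega
        have hp2 : (m.length + 0 + 1) % 2 = 0 := by omega
        rw [if_neg hp, if_pos hp1, if_pos hp2, if_pos rfl, List.foldl_append]
        norm_num
        rw [hBk]
-- ===== VERDICT (by name: the statement is the Claim_ definition above) =====
theorem rearrange_nodes_spec : Claim_equal_rearrange_nodes := by
  intro nodes _
  unfold Spec_rearrange_nodes rearrange_nodes rearrange_nodes_alt
  have h := main_inv nodes (nodes.length - 1)
  show ((List.range (nodes.length - 1)).foldl pvStepA (nodes, 1)).1 = _
  rw [h]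
  rfl
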